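-- pv_equiv track=rewrite | github.com/zhroot/g-codejam | 2020/1c/1.py | proc
-- ===== SOURCE A (Python) =====
-- def check(x,y,step):
--     c = abs(x) + abs(y)
--     return step >= c
--
-- def proc(x,y,s):
--     step = 0
--     if check(x,y,0):
--         return step
--     for i in range(0,len(s)):
--         step += 1
--         ch = s[i]
--         if ch == 'N':
--             y += 1
--         elif ch == 'S':
--             y -= 1
--         elif ch == 'W':
--             x -= 1
--         else:
--             x += 1
--         if check(x,y,step):
--             return step
--     return -1
-- ===== SOURCE B (Python) =====
-- def proc(x, y, s):
--     # Build the full table of cumulative positions (index t = position after t steps),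
--     # then search for the first index t with t >= Manhattan distance; -1 if none.
--     positions = [(x, y)]
--     cx, cy = x, y
--     for ch in s:
--         if ch == 'N':
--             cy += 1
--         elif ch == 'S':
--             cy -= 1
--         elif ch == 'W':
--             cx -= 1
--         else:
--             cx += 1
--         positions.append((cx, cy))
--     for t, (px, py) in enumerate(positions):
--         if t >= abs(px) + abs(py):
--             return t
--     return -1
-- ===== Notes on version B (the rewrite author's own statement) =====
-- stated objective: alternative
-- what changed: Replaces the single incremental early-exit loop with a two-phase decomposition: first build the complete table of cumulative positions, then enumerate it and return the first index t with t >= |x|+|y|.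
import Mathlib
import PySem

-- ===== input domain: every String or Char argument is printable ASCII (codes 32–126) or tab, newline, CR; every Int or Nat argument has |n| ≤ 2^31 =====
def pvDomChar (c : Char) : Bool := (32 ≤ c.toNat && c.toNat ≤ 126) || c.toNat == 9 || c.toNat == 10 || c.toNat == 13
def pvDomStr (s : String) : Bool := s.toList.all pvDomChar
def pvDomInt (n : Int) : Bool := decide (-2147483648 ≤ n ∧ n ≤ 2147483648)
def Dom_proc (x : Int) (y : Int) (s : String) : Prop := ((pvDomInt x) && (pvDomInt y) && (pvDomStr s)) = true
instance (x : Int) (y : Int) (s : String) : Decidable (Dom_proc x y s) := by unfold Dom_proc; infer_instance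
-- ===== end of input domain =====

-- B rebuilds A as a two-phase build-table-then-search decomposition (alternative, not faster).

-- ===== PORT A =====
-- check(x,y,step)
def checkA (x y step : Int) : Bool := decide (step ≥ |x| + |y|)

-- the for-loop of A: walk the chars, update (x,y), early-exit when check holds
def procLoop (cs : List Char) (x y step : Int) : Int :=
  match cs with
  | [] => -1
  | ch :: rest =>
    let step := step + 1
    if ch = 'N' then
      if checkA x (y+1) step then step else procLoop rest x (y+1) step
    else if ch = 'S' then
      if checkA x (y-1) step then step else procLoop rest x (y-1) step
    else if ch = 'W' then
      if checkA (x-1) y step then step else procLoop rest (x-1) y step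
    else
      if checkA (x+1) y step then step else procLoop rest (x+1) y step

def proc (x : Int) (y : Int) (s : String) : Int :=
  if checkA x y 0 then 0 else procLoop s.toList x y 0

-- ===== PORT B =====
-- one step's new position from the current one
def moveB (ch : Char) (p : Int × Int) : Int × Int :=
  if ch = 'N' then (p.1, p.2 + 1)
  else if ch = 'S' then (p.1, p.2 - 1)
  else if ch = 'W' then (p.1 - 1, p.2)
  else (p.1 + 1, p.2)

-- phase 1: the table of cumulative positions AFTER each step (positions[1:])
def buildPos (cs : List Char) (p : Int × Int) : List (Int × Int) :=
  match cs with
  | [] => []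
  | ch :: rest => moveB ch p :: buildPos rest (moveB ch p)

-- phase 2: enumerate the table, return the first index t with t ≥ |px|+|py|
def searchPos (l : List (Int × Int)) (t : Int) : Int :=
  match l with
  | [] => -1
  | (px, py) :: rest => if t ≥ |px| + |py| then t else searchPos rest (t + 1)

def proc_alt (x : Int) (y : Int) (s : String) : Int :=
  searchPos ((x, y) :: buildPos s.toList (x, y)) 0

-- ===== PRECONDITION & SPEC =====
def Spec_proc (x : Int) (y : Int) (s : String) (out : Int) : Prop := out = proc_alt x y s
instance (x : Int) (y : Int) (s : String) (out : Int) : Decidable (Spec_proc x y s out) := by unfold Spec_proc; infer_instance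

-- ===== CLAIM (what is proved, stated in full; the proofs are below) =====
def Claim_equal_proc : Prop := ∀ (x : Int) (y : Int) (s : String), Dom_proc x y s → Spec_proc x y s (proc x y s)

-- ===== LEMMAS AND PROOFS =====
theorem procLoop_eq_search (cs : List Char) :
    ∀ (x y step : Int), procLoop cs x y step = searchPos (buildPos cs (x, y)) (step + 1) := by
  induction cs with
  | nil => intro x y step; rfl
  | cons ch rest ih =>
    intro x y step
    simp only [procLoop, buildPos, searchPos, moveB, checkA]
    by_cases hN : ch = 'N' <;> by_cases hS : ch = 'S' <;> by_cases hW : ch = 'W' <;>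
      simp [hN, hS, hW, ih, decide_eq_true_eq]

-- ===== VERDICT (by name: the statement is the Claim_ definition above) =====
theorem proc_spec : Claim_equal_proc := by
  intro x y s _
  unfold Spec_proc proc proc_alt
  simp only [searchPos, checkA]
  by_cases h : (0 : Int) ≥ |x| + |y| <;>
    simp [h, procLoop_eq_search]
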